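-- pv_equiv track=rewrite | github.com/jeff87654/Lifting | run_sn_fresh.py | enumerate_combos
-- ===== SOURCE A (Python) =====
-- from collections import Counter
--
-- NR_TRANSITIVE = {
--     1: 1, 2: 1, 3: 2, 4: 5, 5: 5, 6: 16, 7: 7, 8: 50, 9: 34, 10: 45,
--     11: 8, 12: 301, 13: 9, 14: 63, 15: 104, 16: 1954, 17: 5, 18: 983, 19: 8,
-- }
--
-- def multisets(n_t: int, k: int):
--     """All non-decreasing k-tuples from {1..n_t}."""
--     out = []
--
--     def rec(start, rem, cur):
--         if rem == 0:
--             out.append(tuple(cur))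
--             return
--         for i in range(start, n_t + 1):
--             cur.append(i)
--             rec(i, rem - 1, cur)
--             cur.pop()
--
--     rec(1, k, [])
--     return out
--
-- def enumerate_combos(partition):
--     """For partition like (4, 2, 2): for each distinct part d, choose a
--     multiset of t-indices of size = count(d). Cross-product across distinct
--     parts. Returns list of combos, each a tuple of (d, t) sorted by (d, t).
--     """
--     counts = Counter(partition)
--     distinct_ds = sorted(counts.keys())
--     per_d_choices = {d: multisets(NR_TRANSITIVE[d], counts[d]) for d in distinct_ds}
--     combos = []
--
--     def rec(i, cur):
--         if i == len(distinct_ds):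
--             combos.append(tuple(sorted(cur)))
--             return
--         d = distinct_ds[i]
--         for choice in per_d_choices[d]:
--             new = cur + [(d, t) for t in choice]
--             rec(i + 1, new)
--
--     rec(0, [])
--     return combos
-- ===== SOURCE B (Python) =====
-- NR_TRANSITIVE = {
--     1: 1, 2: 1, 3: 2, 4: 5, 5: 5, 6: 16, 7: 7, 8: 50, 9: 34, 10: 45,
--     11: 8, 12: 301, 13: 9, 14: 63, 15: 104, 16: 1954, 17: 5, 18: 983, 19: 8,
-- }
--
-- def multisets(n_t, k):
--     """All non-decreasing k-tuples from {1..n_t}, built layer by layer."""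
--     tuples = [()]
--     for _ in range(k):
--         tuples = [t + (i,) for t in tuples
--                   for i in range(t[-1] if t else 1, n_t + 1)]
--     return tuples
--
-- def enumerate_combos(partition):
--     distinct_ds = sorted(set(partition))
--     combos = [()]
--     for d in distinct_ds:
--         blocks = multisets(NR_TRANSITIVE[d], partition.count(d))
--         combos = [c + tuple((d, t) for t in choice)
--                   for c in combos for choice in blocks]
--     return [tuple(sorted(c)) for c in combos]
-- ===== Notes on version B (the rewrite author's own statement) =====
-- stated objective: alternative
-- what changed: Both nested recursions are replaced by iterative comprehension folds: multisets is built layer by layer (extend every tuple at its right end) instead of depth-first backtracking, the cross-product is a left fold over the distinct parts instead of an index recursion, distinct parts come from sorted(set(...)) and multiplicities from list.count instead of a Counter, and the final sort is applied once per finished combo in a comprehension.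
import Mathlib
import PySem

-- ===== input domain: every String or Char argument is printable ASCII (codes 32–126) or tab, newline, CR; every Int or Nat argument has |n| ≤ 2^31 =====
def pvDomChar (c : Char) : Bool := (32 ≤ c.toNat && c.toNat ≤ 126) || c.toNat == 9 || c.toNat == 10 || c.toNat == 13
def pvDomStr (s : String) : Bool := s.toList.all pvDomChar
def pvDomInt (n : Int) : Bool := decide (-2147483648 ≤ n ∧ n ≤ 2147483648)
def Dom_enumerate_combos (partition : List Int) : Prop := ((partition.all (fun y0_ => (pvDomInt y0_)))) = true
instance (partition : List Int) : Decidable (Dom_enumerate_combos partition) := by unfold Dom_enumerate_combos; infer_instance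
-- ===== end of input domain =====

-- B replaces A's two nested recursions by iterative comprehension folds (layered multiset build,
-- left fold for the cross-product); same output, no speed claim (objective: alternative).


-- ===== PORT A =====
-- NR_TRANSITIVE, the module constant
def pvNRT : PySem.Dict Int Int := PySem.Dict.ofList
  [(1,1),(2,1),(3,2),(4,5),(5,5),(6,16),(7,7),(8,50),(9,34),(10,45),
   (11,8),(12,301),(13,9),(14,63),(15,104),(16,1954),(17,5),(18,983),(19,8)]

-- A's inner `rec` of `multisets`: rem ported as Nat (it is counts[d] ≥ 0; the loop stops at rem == 0);
-- cur.append(i) / rec / cur.pop() is the recursive call on cur ++ [i].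
def pvMsRecA (n_t : Int) (start : Int) : Nat → List Int → List (List Int)
  | 0, cur => [cur]
  | rem+1, cur =>
      (PySem.List.pyRange start (n_t + 1) 1).flatMap (fun i => pvMsRecA n_t i rem (cur ++ [i]))

def pvMultisetsA (n_t : Int) (k : Nat) : List (List Int) := pvMsRecA n_t 1 k []

-- A's inner `rec` of `enumerate_combos`; per_d_choices is a dict comprehension only ever looked up
-- at its own keys, ported as the function it tabulates. sorted(cur) on pairs = sorted2 by (fst, snd).
def pvCrossRecA (perD : Int → List (List Int)) : List Int → List (Int × Int) → List (List (Int × Int))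
  | [], cur => [PySem.List.sorted2 cur (fun p => p.1) (fun p => p.2) false]
  | d :: rest, cur =>
      (perD d).flatMap (fun choice => pvCrossRecA perD rest (cur ++ choice.map (fun t => (d, t))))

def enumerate_combos (partition : List Int) : List (List (Int × Int)) :=
  let counts := PySem.Dict.counter partition
  let distinct_ds := PySem.List.sorted counts.keys (fun x => x) false
  -- NR_TRANSITIVE[d]: total form of the lookup; Pre_ guarantees the key is present (else KeyError)
  let perD := fun d => pvMultisetsA ((pvNRT.get? d).getD 0) ((counts.getD d 0).toNat)
  pvCrossRecA perD distinct_ds []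

-- ===== PORT B =====
-- Source B's multisets: k layers, each extending every tuple at its right end (t[-1] if t else 1 = getLast?.getD 1)
def pvMultisetsB (n_t : Int) (k : Nat) : List (List Int) :=
  (List.range k).foldl
    (fun tuples _ =>
      tuples.flatMap (fun t =>
        (PySem.List.pyRange (t.getLast?.getD 1) (n_t + 1) 1).map (fun i => t ++ [i])))
    [[]]

def enumerate_combos_alt (partition : List Int) : List (List (Int × Int)) :=
  let distinct_ds := PySem.List.sorted (PySem.Set.ofList partition) (fun x => x) false
  let combos := distinct_ds.foldl
    (fun combos d =>
      let blocks := pvMultisetsB ((pvNRT.get? d).getD 0) (partition.count d)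
      combos.flatMap (fun c => blocks.map (fun choice => c ++ choice.map (fun t => (d, t)))))
    [[]]
  combos.map (fun c => PySem.List.sorted2 c (fun p => p.1) (fun p => p.2) false)

-- ===== PRECONDITION & SPEC =====
-- A (and B) raise KeyError when some part is not a key of NR_TRANSITIVE, i.e. not in 1..19.
def Pre_enumerate_combos (partition : List Int) : Prop :=
  ∀ d ∈ partition, 1 ≤ d ∧ d ≤ 19
instance (partition : List Int) : Decidable (Pre_enumerate_combos partition) := by
  unfold Pre_enumerate_combos; infer_instance
def pvWitness_enumerate_combos : List Int := [2, 1, 1]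

def Spec_enumerate_combos (partition : List Int) (out : List (List (Int × Int))) : Prop := out = enumerate_combos_alt partition
instance (partition : List Int) (out : List (List (Int × Int))) : Decidable (Spec_enumerate_combos partition out) := by unfold Spec_enumerate_combos; infer_instance

-- ===== CLAIM (what is proved, stated in full; the proofs are below) =====
def Claim_equal_enumerate_combos : Prop := ∀ (partition : List Int), Dom_enumerate_combos partition → Pre_enumerate_combos partition → Spec_enumerate_combos partition (enumerate_combos partition)

-- ===== LEMMAS AND PROOFS =====

theorem pvFlatMapSingleton {A B : Type} (L : List A) (f : A → B) :
    L.flatMap (fun x => [f x]) = L.map f := by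
  induction L with
  | nil => rfl
  | cons a t ih => simp [ih]

-- A's rec with a non-empty accumulated prefix = the prefix mapped over the rec from an empty one
theorem pvMsRecA_append (n : Int) (k : Nat) : ∀ (s : Int) (cur : List Int),
    pvMsRecA n s k cur = (pvMsRecA n s k []).map (cur ++ ·) := by
  induction k with
  | zero => intro s cur; simp [pvMsRecA]
  | succ k ih =>
      intro s cur
      simp only [pvMsRecA, List.map_flatMap]
      refine List.flatMap_congr ?_ -- pointwise
      intro i _
      rw [ih i (cur ++ [i]), ih i ([] ++ [i])]
      simp [List.map_map, Function.comp, List.append_assoc]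

-- one B-layer applied to A's depth-k result gives A's depth-(k+1) result
theorem pvMs_step (n : Int) : ∀ (k : Nat) (s : Int),
    (pvMsRecA n s k []).flatMap (fun t =>
        (PySem.List.pyRange (t.getLast?.getD s) (n + 1) 1).map (fun i => t ++ [i]))
      = pvMsRecA n s (k+1) [] := by
  intro k
  induction k with
  | zero =>
      intro s
      simp only [pvMsRecA, List.flatMap_cons, List.flatMap_nil, List.nil_append,
        List.append_nil, List.getLast?_nil, Option.getD_none]
      exact (pvFlatMapSingleton (PySem.List.pyRange s (n + 1) 1) (fun i => [i])).symm
  | succ k ih =>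
      intro s
      conv_lhs => rw [show pvMsRecA n s (k+1) [] =
        (PySem.List.pyRange s (n + 1) 1).flatMap (fun i => pvMsRecA n i k ([] ++ [i])) from rfl]
      rw [show pvMsRecA n s (k+1+1) [] =
        (PySem.List.pyRange s (n + 1) 1).flatMap (fun i => pvMsRecA n i (k+1) ([] ++ [i])) from rfl]
      rw [List.flatMap_assoc]
      refine List.flatMap_congr ?_
      intro i _
      rw [pvMsRecA_append n k i ([] ++ [i]), pvMsRecA_append n (k+1) i ([] ++ [i])]
      rw [List.flatMap_map]
      rw [← ih i, List.map_flatMap]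
      refine List.flatMap_congr ?_
      intro t _
      have hlast : (([] ++ [i] : List Int) ++ t).getLast?.getD s = t.getLast?.getD i := by
        cases t with
        | nil => simp
        | cons a l =>
            rcases e : (a :: l).getLast? with _ | x
            · rw [List.getLast?_eq_none_iff] at e; exact absurd e (by simp)
            · simp [e]
      simp only [hlast]
      simp [List.map_map, Function.comp]

-- B's multisets equals A's multisets
theorem pvMultisets_eq (n : Int) (k : Nat) : pvMultisetsB n k = pvMultisetsA n k := by
  unfold pvMultisetsB pvMultisetsA
  induction k with
  | zero => simp [pvMsRecA]
  | succ k ih =>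
      rw [List.range_succ, List.foldl_append, ih]
      simpa using pvMs_step n k 1

-- the sortless cross product (flattened blocks, left part first)
def pvFlats (perD : Int → List (List Int)) : List Int → List (List (Int × Int))
  | [] => [[]]
  | d :: rest =>
      (perD d).flatMap (fun ch => (pvFlats perD rest).map (fun f => ch.map (fun t => (d, t)) ++ f))

theorem pvCrossRecA_eq (perD : Int → List (List Int)) : ∀ (ds : List Int) (cur : List (Int × Int)),
    pvCrossRecA perD ds cur
      = (pvFlats perD ds).map (fun f => PySem.List.sorted2 (cur ++ f) (fun p => p.1) (fun p => p.2) false) := by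
  intro ds
  induction ds with
  | nil => intro cur; simp [pvCrossRecA, pvFlats]
  | cons d rest ih =>
      intro cur
      simp only [pvCrossRecA, pvFlats, List.map_flatMap]
      refine List.flatMap_congr ?_
      intro ch _
      rw [ih]
      simp [List.map_map, Function.comp, List.append_assoc]

theorem pvFoldB_eq (blocks : Int → List (List Int)) : ∀ (ds : List Int) (acc : List (List (Int × Int))),
    ds.foldl (fun combos d =>
        combos.flatMap (fun c => (blocks d).map (fun choice => c ++ choice.map (fun t => (d, t))))) acc
      = acc.flatMap (fun c => (pvFlats blocks ds).map (fun f => c ++ f)) := by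
  intro ds
  induction ds with
  | nil => intro acc; simp [pvFlats]
  | cons d rest ih =>
      intro acc
      rw [List.foldl_cons, ih]
      simp only [pvFlats, List.flatMap_assoc]
      refine List.flatMap_congr ?_
      intro c _
      rw [List.flatMap_map, List.map_flatMap]
      refine List.flatMap_congr ?_
      intro ch _
      simp [List.map_map, Function.comp, List.append_assoc]

-- ===== VERDICT (by name: the statement is the Claim_ definition above) =====
theorem enumerate_combos_spec : Claim_equal_enumerate_combos := by
  intro partition _ _
  unfold Spec_enumerate_combos enumerate_combos enumerate_combos_alt
  have hkeys : (PySem.Dict.counter partition).keys = PySem.Set.ofList partition :=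
    PySem.Dict.keys_counter partition
  have hperD : (fun d => pvMultisetsA ((pvNRT.get? d).getD 0) (((PySem.Dict.counter partition).getD d 0).toNat))
      = (fun d => pvMultisetsB ((pvNRT.get? d).getD 0) (partition.count d)) := by
    funext d
    rw [pvMultisets_eq, PySem.Dict.getD_counter]
    simp
  simp only [hkeys, pvCrossRecA_eq, hperD, pvFoldB_eq]
  simp
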